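-- pv_equiv track=rewrite | github.com/Olalekanrasaq/bioinformatics_app | bioinformatics.py | PairwiseSeqAlign
-- ===== SOURCE A (Python) =====
-- def PairwiseSeqAlign(seq1, seq2):
--     char_list = []
--     for i in range(len(seq1)):
--         if seq1[i] != seq2[i]:
--             char = i
--             char_list.append(char)
--     align = '|'*len(seq1)
--     temp = list(align)
--     for idx in char_list:
--         temp[idx] = '-'
--     res = ''.join(temp)
--     return seq1, seq2, res
-- ===== SOURCE B (Python) =====
-- def PairwiseSeqAlign(seq1, seq2):
--     res = ''.join('|' if seq1[i] == seq2[i] else '-' for i in range(len(seq1)))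
--     return seq1, seq2, res
-- ===== Notes on version B (the rewrite author's own statement) =====
-- stated objective: simpler
-- what changed: B emits the alignment string in one pass ('|' or '-' per position) instead of A's two passes that collect a mismatch-index list and then mutate a '|'-filled char list.
import Mathlib
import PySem

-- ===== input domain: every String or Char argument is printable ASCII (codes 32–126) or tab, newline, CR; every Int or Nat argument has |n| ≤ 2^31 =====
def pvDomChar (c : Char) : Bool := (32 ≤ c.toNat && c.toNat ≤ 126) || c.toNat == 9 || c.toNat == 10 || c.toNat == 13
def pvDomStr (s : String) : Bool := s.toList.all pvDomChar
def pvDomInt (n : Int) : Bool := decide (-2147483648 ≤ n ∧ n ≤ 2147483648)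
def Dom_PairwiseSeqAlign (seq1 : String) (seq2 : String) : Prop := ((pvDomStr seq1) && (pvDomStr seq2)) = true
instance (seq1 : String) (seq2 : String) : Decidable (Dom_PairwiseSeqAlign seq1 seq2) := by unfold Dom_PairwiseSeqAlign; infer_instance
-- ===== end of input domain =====

-- B builds the alignment string in ONE pass instead of A's mismatch-index list plus mutation pass; return value equivalence, no mutation involved.

-- ===== PORT A =====
def PairwiseSeqAlign (seq1 : String) (seq2 : String) : String × String × String :=
  let l1 := seq1.toList
  let l2 := seq2.toList
  -- char_list = []; for i in range(len(seq1)): if seq1[i] != seq2[i]: char_list.append(i)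
  let charList : List Int :=
    (PySem.List.pyRange 0 (PySem.Str.len seq1) 1).foldl
      (fun acc i => if PySem.List.pyGetD l1 i ' ' ≠ PySem.List.pyGetD l2 i ' ' then acc ++ [i] else acc) []
  -- align = '|'*len(seq1); temp = list(align)
  let temp : List Char := PySem.List.pyRepeat ['|'] (PySem.Str.len seq1)
  -- for idx in char_list: temp[idx] = '-'
  let temp2 : List Char := charList.foldl (fun t idx => PySem.List.pySetD t idx '-') temp
  -- res = ''.join(temp)
  (seq1, seq2, String.ofList temp2)

-- ===== PORT B =====
def PairwiseSeqAlign_alt (seq1 : String) (seq2 : String) : String × String × String :=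
  -- res = ''.join('|' if seq1[i] == seq2[i] else '-' for i in range(len(seq1)))
  let res : List Char :=
    (PySem.List.pyRange 0 (PySem.Str.len seq1) 1).map
      (fun i => if PySem.List.pyGetD seq1.toList i ' ' = PySem.List.pyGetD seq2.toList i ' ' then '|' else '-')
  (seq1, seq2, String.ofList res)

-- ===== PRECONDITION & SPEC =====
-- A (and B) index seq2 at every position of seq1, so both raise IndexError when seq2 is shorter than seq1.
def Pre_PairwiseSeqAlign (seq1 : String) (seq2 : String) : Prop :=
  seq1.toList.length ≤ seq2.toList.length
instance (seq1 : String) (seq2 : String) : Decidable (Pre_PairwiseSeqAlign seq1 seq2) := by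
  unfold Pre_PairwiseSeqAlign; infer_instance
def pvWitness_PairwiseSeqAlign : String × String := ("ACGT", "AGGA")

def Spec_PairwiseSeqAlign (seq1 : String) (seq2 : String) (out : String × String × String) : Prop := out = PairwiseSeqAlign_alt seq1 seq2
instance (seq1 : String) (seq2 : String) (out : String × String × String) : Decidable (Spec_PairwiseSeqAlign seq1 seq2 out) := by unfold Spec_PairwiseSeqAlign; infer_instance

-- ===== CLAIM (what is proved, stated in full; the proofs are below) =====
def Claim_equal_PairwiseSeqAlign : Prop := ∀ (seq1 : String) (seq2 : String), Dom_PairwiseSeqAlign seq1 seq2 → Pre_PairwiseSeqAlign seq1 seq2 → Spec_PairwiseSeqAlign seq1 seq2 (PairwiseSeqAlign seq1 seq2)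

-- ===== LEMMAS AND PROOFS =====

-- sets at indices < t.length do not touch an appended last element
theorem pvSetFold_append (L : List Int) (t : List Char) (c : Char)
    (hb : ∀ i ∈ L, 0 ≤ i ∧ i < (t.length : Int)) :
    L.foldl (fun t idx => PySem.List.pySetD t idx '-') (t ++ [c])
      = (L.foldl (fun t idx => PySem.List.pySetD t idx '-') t) ++ [c] := by
  induction L generalizing t with
  | nil => rfl
  | cons i L ih =>
    obtain ⟨h0, hlt⟩ := hb i (by simp)
    have hi : i.toNat < t.length := by omega
    have hset : PySem.List.pySetD (t ++ [c]) i '-' = PySem.List.pySetD t i '-' ++ [c] := by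
      rw [PySem.List.pySetD_of_nonneg _ _ h0, PySem.List.pySetD_of_nonneg _ _ h0,
        List.set_append_left _ _ hi]
    simp only [List.foldl, hset]
    exact ih _ (fun j hj => by
      have := hb j (by simp [hj])
      simpa [PySem.List.length_pySetD] using this)

-- the core identity: the filter-then-mutate computation equals the one-pass map
theorem pvCore (p : Int → Prop) [DecidablePred p] (n : Nat) :
    ((PySem.List.pyRange 0 (n : Int) 1).filter (fun i => decide (p i))).foldl
        (fun t idx => PySem.List.pySetD t idx '-') (List.replicate n '|')
      = (PySem.List.pyRange 0 (n : Int) 1).map (fun i => if p i then '-' else '|') := by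
  induction n with
  | zero => simp [PySem.List.pyRange_one_eq_nil]
  | succ n ih =>
    have hsplit : PySem.List.pyRange 0 ((n : Int) + 1) 1
        = PySem.List.pyRange 0 (n : Int) 1 ++ [(n : Int)] :=
      PySem.List.pyRange_one_succ_right (by positivity)
    have hb : ∀ i ∈ (PySem.List.pyRange 0 (n : Int) 1).filter (fun i => decide (p i)),
        0 ≤ i ∧ i < ((List.replicate n '|').length : Int) := by
      intro i hi
      have := List.mem_filter.mp hi |>.1
      have := (PySem.List.mem_pyRange_one).mp this
      simpa using this
    have hrep : List.replicate (n + 1) '|' = List.replicate n '|' ++ ['|'] := by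
      simp [List.replicate_succ']
    push_cast
    rw [hsplit, List.filter_append, List.foldl_append, List.map_append, hrep]
    by_cases hp : p (n : Int)
    · have hlast : ((([(n : Int)]).filter (fun i => decide (p i)))) = [(n : Int)] := by
        simp [hp]
      rw [hlast]
      simp only [List.foldl_cons, List.foldl_nil]
      rw [pvSetFold_append _ _ _ hb, ih]
      have hlen : ((PySem.List.pyRange 0 (n : Int) 1).filter (fun i => decide (p i))).foldl
          (fun t idx => PySem.List.pySetD t idx '-') (List.replicate n '|')
          = (PySem.List.pyRange 0 (n : Int) 1).map (fun i => if p i then '-' else '|') := ih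
      set X := (PySem.List.pyRange 0 (n : Int) 1).map (fun i => if p i then '-' else '|') with hX
      have hXlen : X.length = n := by simp [hX, PySem.List.length_pyRange_one]
      have : PySem.List.pySetD (X ++ ['|']) (n : Int) '-' = X ++ ['-'] := by
        rw [PySem.List.pySetD_of_nonneg _ _ (by positivity)]
        have : ((n : Int)).toNat = X.length := by omega
        rw [this, List.set_append_right _ _ (le_refl _)]
        simp
      rw [this]
      simp [hp]
    · have hlast : ((([(n : Int)]).filter (fun i => decide (p i)))) = [] := by
        simp [hp]
      rw [hlast]
      simp only [List.foldl_nil]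
      rw [pvSetFold_append _ _ _ hb, ih]
      simp [hp]

-- ===== VERDICT (by name: the statement is the Claim_ definition above) =====
theorem PairwiseSeqAlign_spec : Claim_equal_PairwiseSeqAlign := by
  intro seq1 seq2 _ _
  unfold Spec_PairwiseSeqAlign PairwiseSeqAlign PairwiseSeqAlign_alt
  simp only [Prod.mk.injEq, true_and]
  congr 1
  have hfold := PySem.List.foldl_append_ite_eq_filter
    (l := PySem.List.pyRange 0 (PySem.Str.len seq1) 1)
    (p := fun i => PySem.List.pyGetD seq1.toList i ' ' ≠ PySem.List.pyGetD seq2.toList i ' ')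
    (acc := ([] : List Int))
  simp only [hfold, List.nil_append]
  have hrep : PySem.List.pyRepeat ['|'] (PySem.Str.len seq1)
      = List.replicate seq1.toList.length '|' := by
    rw [PySem.List.pyRepeat_singleton]
    simp [PySem.Str.len_eq]
  have hlen : PySem.Str.len seq1 = (seq1.toList.length : Int) := by simp [PySem.Str.len_eq]
  rw [hrep, hlen]
  have := pvCore (fun i => PySem.List.pyGetD seq1.toList i ' ' ≠ PySem.List.pyGetD seq2.toList i ' ')
    seq1.toList.length
  rw [this]
  apply List.map_congr_left
  intro i _
  by_cases h : PySem.List.pyGetD seq1.toList i ' ' = PySem.List.pyGetD seq2.toList i ' ' <;> simp [h]
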